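-- pv_equiv track=rewrite | github.com/prady2002/localforge | localforge/cloud/engine.py | _prune_working_messages
-- ===== SOURCE A (Python) =====
-- from typing import Any
--
-- def _prune_working_messages(messages: list[dict[str, Any]], max_chars: int = 100_000) -> list[dict[str, Any]]:
--     """Prune old messages to keep working context under budget.
--
--     Keeps the first message (user's original request) and the most recent
--     messages, dropping older tool result rounds from the middle.  Inserts
--     a summary marker so the model knows context was pruned.
--     """
--     total = sum(len(m.get("content", "")) for m in messages)
--     if total <= max_chars:
--         return messages
--
--     if len(messages) <= 4:
--         return messages
--
--     # Keep first 2 messages (original request + first response) and last N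
--     # Drop from the middle (older tool result rounds)
--     first = messages[:2]
--     rest = messages[2:]
--     dropped_count = 0
--
--     while total > max_chars and len(rest) > 4:
--         dropped = rest.pop(0)
--         total -= len(dropped.get("content", ""))
--         dropped_count += 1
--
--     # Insert a marker so the model knows messages were pruned
--     if dropped_count > 0:
--         marker = {
--             "role": "user",
--             "content": (
--                 f"[Context pruned: {dropped_count} earlier messages removed to stay within "
--                 f"context budget. The original request and most recent messages are preserved.]"
--             ),
--         }
--         return first + [marker] + rest
--
--     return first + rest
-- ===== SOURCE B (Python) =====
-- from typing import Any
--
-- def _prune_working_messages(messages: list[dict[str, Any]], max_chars: int = 100_000) -> list[dict[str, Any]]: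
--     """Prune old messages to keep working context under budget (prefix scan + slice)."""
--     lens = [len(m.get("content", "")) for m in messages]
--     total = sum(lens)
--     if total <= max_chars or len(messages) <= 6:
--         return messages
--     # lengths of the messages eligible to be dropped (keep first 2 and last 4)
--     droppable = lens[2:len(messages) - 4]
--     k = 0
--     running = total
--     for l in droppable:
--         if running <= max_chars:
--             break
--         running -= l
--         k += 1
--     marker = {
--         "role": "user",
--         "content": (
--             f"[Context pruned: {k} earlier messages removed to stay within "
--             f"context budget. The original request and most recent messages are preserved.]"
--         ),
--     }
--     return messages[:2] + [marker] + messages[2 + k:]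
-- ===== Notes on version B (the rewrite author's own statement) =====
-- stated objective: alternative
-- what changed: A repeatedly pops the front of the middle-message list while re-decrementing a running total and finally rebuilds the list; B precomputes the per-message content lengths once, finds the drop cutoff with a single prefix-sum scan over the droppable lengths, and returns two slices plus the marker.
import Mathlib
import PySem

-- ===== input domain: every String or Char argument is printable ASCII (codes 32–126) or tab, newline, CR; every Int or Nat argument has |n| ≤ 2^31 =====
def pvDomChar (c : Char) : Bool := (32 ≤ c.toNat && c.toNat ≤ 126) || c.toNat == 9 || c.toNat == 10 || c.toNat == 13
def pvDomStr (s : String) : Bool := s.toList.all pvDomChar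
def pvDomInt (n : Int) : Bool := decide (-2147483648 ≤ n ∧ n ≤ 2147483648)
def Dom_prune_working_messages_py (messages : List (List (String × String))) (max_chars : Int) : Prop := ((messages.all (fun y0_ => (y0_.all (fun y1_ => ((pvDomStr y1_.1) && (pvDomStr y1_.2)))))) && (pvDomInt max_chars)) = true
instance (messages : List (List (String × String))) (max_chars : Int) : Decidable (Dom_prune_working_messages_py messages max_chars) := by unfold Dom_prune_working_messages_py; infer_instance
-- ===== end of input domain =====

-- B replaces A's pop(0)-and-rebuild loop over the message list by a one-pass prefix scan over
-- precomputed content lengths followed by a single slice (objective: alternative algorithm).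


-- ===== PORT A =====
-- m.get("content", ""): first-match lookup in the association list (exact for a Python dict)
def pvContentLen (m : List (String × String)) : Int :=
  PySem.Str.len (((m.find? (fun p => p.1 == "content")).map Prod.snd).getD "")

-- the pruned-context marker dict (identical literal in both Pythons)
def pvMarker (k : Int) : List (String × String) :=
  [("role", "user"),
   ("content", "[Context pruned: " ++ PySem.Int.toStr k ++ " earlier messages removed to stay within context budget. The original request and most recent messages are preserved.]")]

-- A's while loop: pop rest[0] while total > max_chars and len(rest) > 4
def pvPruneLoopA (max_chars : Int) (rest : List (List (String × String))) (total dropped : Int) :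
    List (List (String × String)) × Int × Int :=
  if max_chars < total ∧ 4 < rest.length then
    match rest with
    | [] => ([], total, dropped)   -- unreachable (length > 4); total guard only
    | d :: rs => pvPruneLoopA max_chars rs (total - pvContentLen d) (dropped + 1)
  else (rest, total, dropped)
termination_by rest

def prune_working_messages_py (messages : List (List (String × String))) (max_chars : Int) : List (List (String × String)) :=
  let total := messages.foldl (fun acc m => acc + pvContentLen m) 0
  if total ≤ max_chars then messages
  else if messages.length ≤ 4 then messages
  else
    let first := PySem.List.slice messages none (some 2)
    let rest := PySem.List.slice messages (some 2) none
    let res := pvPruneLoopA max_chars rest total 0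
    if 0 < res.2.2 then first ++ [pvMarker res.2.2] ++ res.1
    else first ++ res.1

-- ===== PORT B =====
-- B's for-with-break over the droppable lengths: counts how many to drop
def pvFindCut (max_chars : Int) : List Int → Int → Int → Int
  | [], _, k => k
  | l :: ls, running, k =>
    if running ≤ max_chars then k
    else pvFindCut max_chars ls (running - l) (k + 1)

def prune_working_messages_py_alt (messages : List (List (String × String))) (max_chars : Int) : List (List (String × String)) :=
  let lens := messages.map pvContentLen
  let total := lens.sum
  if total ≤ max_chars ∨ messages.length ≤ 6 then messages
  else
    let droppable := PySem.List.slice lens (some 2) (some ((messages.length : Int) - 4))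
    let k := pvFindCut max_chars droppable total 0
    PySem.List.slice messages none (some 2) ++ [pvMarker k] ++
      PySem.List.slice messages (some (2 + k)) none

-- ===== PRECONDITION & SPEC =====
def Spec_prune_working_messages_py (messages : List (List (String × String))) (max_chars : Int) (out : List (List (String × String))) : Prop := out = prune_working_messages_py_alt messages max_chars
instance (messages : List (List (String × String))) (max_chars : Int) (out : List (List (String × String))) : Decidable (Spec_prune_working_messages_py messages max_chars out) := by unfold Spec_prune_working_messages_py; infer_instance

-- ===== CLAIM (what is proved, stated in full; the proofs are below) =====
def Claim_equal_prune_working_messages_py : Prop := ∀ (messages : List (List (String × String))) (max_chars : Int), Dom_prune_working_messages_py messages max_chars → Spec_prune_working_messages_py messages max_chars (prune_working_messages_py messages max_chars)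

-- ===== LEMMAS AND PROOFS =====

-- accumulator shift for the cut counter
theorem pvFindCut_acc (mc : Int) (ls : List Int) : ∀ (r k : Int),
    pvFindCut mc ls r k = k + pvFindCut mc ls r 0 := by
  induction ls with
  | nil => intro r k; simp [pvFindCut]
  | cons l ls ih =>
    intro r k
    simp only [pvFindCut]
    by_cases h : r ≤ mc
    · simp [h]
    · rw [if_neg h, if_neg h, ih (r - l) (k + 1), ih (r - l) (0 + 1)]
      ring

theorem pvFindCut_nonneg (mc : Int) (ls : List Int) (r : Int) : 0 ≤ pvFindCut mc ls r 0 := by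
  cases ls with
  | nil => simp [pvFindCut]
  | cons l ls =>
    simp only [pvFindCut]
    by_cases h : r ≤ mc
    · simp [h]
    · rw [if_neg h, pvFindCut_acc]
      have := pvFindCut_nonneg mc ls (r - l)
      omega

theorem pvFindCut_pos (mc : Int) (l : Int) (ls : List Int) (r : Int) (h : mc < r) :
    0 < pvFindCut mc (l :: ls) r 0 := by
  simp only [pvFindCut, if_neg (by omega : ¬ r ≤ mc)]
  rw [pvFindCut_acc]
  have := pvFindCut_nonneg mc ls (r - l)
  omega

-- A's pop loop computes B's cut: it drops exactly pvFindCut-many leading messages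
theorem loop_eq (mc : Int) : ∀ (t : Nat) (rest : List (List (String × String))) (total d : Int),
    rest.length = t + 4 →
    (pvPruneLoopA mc rest total d).1
        = rest.drop (pvFindCut mc ((rest.take t).map pvContentLen) total 0).toNat ∧
    (pvPruneLoopA mc rest total d).2.2
        = d + pvFindCut mc ((rest.take t).map pvContentLen) total 0 := by
  intro t
  induction t with
  | zero =>
    intro rest total d hlen
    rw [pvPruneLoopA.eq_def]
    simp [hlen, pvFindCut]
  | succ t ih =>
    intro rest total d hlen
    cases rest with
    | nil => simp at hlen
    | cons r rs =>
      by_cases hm : mc < total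
      · have hc : mc < total ∧ 4 < (r :: rs).length := ⟨hm, by simp at hlen ⊢; omega⟩
        rw [pvPruneLoopA.eq_def, if_pos hc]
        have hrs : rs.length = t + 4 := by simp at hlen; omega
        obtain ⟨h1, h2⟩ := ih rs (total - pvContentLen r) (d + 1) hrs
        have hcut : pvFindCut mc (((r :: rs).take (t+1)).map pvContentLen) total 0
            = 1 + pvFindCut mc ((rs.take t).map pvContentLen) (total - pvContentLen r) 0 := by
          simp only [List.take_succ_cons, List.map_cons, pvFindCut,
            if_neg (by omega : ¬ total ≤ mc)]
          rw [pvFindCut_acc]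
          ring
        refine ⟨?_, ?_⟩
        · show (pvPruneLoopA mc rs (total - pvContentLen r) (d + 1)).1 = _
          rw [h1, hcut]
          have hnn := pvFindCut_nonneg mc ((rs.take t).map pvContentLen) (total - pvContentLen r)
          have ht : (1 + pvFindCut mc ((rs.take t).map pvContentLen) (total - pvContentLen r) 0).toNat
              = (pvFindCut mc ((rs.take t).map pvContentLen) (total - pvContentLen r) 0).toNat + 1 := by
            omega
          rw [ht, List.drop_succ_cons]
        · show (pvPruneLoopA mc rs (total - pvContentLen r) (d + 1)).2.2 = _
          rw [h2, hcut]
          ring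
      · rw [pvPruneLoopA.eq_def, if_neg (by intro h; exact hm h.1)]
        have hz : total ≤ mc := le_of_not_gt hm
        simp [pvFindCut, hz]

-- the two total computations agree
theorem total_eq (messages : List (List (String × String))) :
    messages.foldl (fun acc m => acc + pvContentLen m) 0 = (messages.map pvContentLen).sum := by
  rw [List.sum_eq_foldl, List.foldl_map]

-- ===== VERDICT (by name: the statement is the Claim_ definition above) =====
theorem prune_working_messages_py_spec : Claim_equal_prune_working_messages_py := by
  intro messages mc _hdom
  unfold Spec_prune_working_messages_py
  unfold prune_working_messages_py prune_working_messages_py_alt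
  simp only [total_eq]
  set lens := messages.map pvContentLen with hlens
  by_cases hT : lens.sum ≤ mc
  · simp [hT]
  · rw [if_neg hT]
    by_cases h4 : messages.length ≤ 4
    · rw [if_pos h4, if_pos (Or.inr (by omega))]
    · rw [if_neg h4]
      have hrest : PySem.List.slice messages (some 2) none = messages.drop 2 := by
        rw [PySem.List.slice_from _ (by omega)]; rfl
      by_cases h6 : messages.length ≤ 6
      · -- 5 or 6 messages: A's loop is idle (rest has ≤ 4 elements), dropped = 0
        have hidle : pvPruneLoopA mc (messages.drop 2) lens.sum 0 = (messages.drop 2, lens.sum, 0) := by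
          rw [pvPruneLoopA.eq_def, if_neg (by simp; omega)]
        rw [if_pos (Or.inr h6), hrest, hidle, PySem.List.slice_to _ (by omega)]
        simp
      · -- more than 6 messages: the loop drops exactly the cut, the marker is inserted
        have hlen2 : (messages.drop 2).length = (messages.length - 6) + 4 := by
          simp; omega
        obtain ⟨h1, h2⟩ := loop_eq mc (messages.length - 6) (messages.drop 2) lens.sum 0 hlen2
        have hdrop : PySem.List.slice lens (some 2) (some ((messages.length : Int) - 4))
            = ((messages.drop 2).take (messages.length - 6)).map pvContentLen := by
          rw [PySem.List.slice_toNat]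
          · rw [hlens, List.map_take, List.map_drop]
            congr 1
            omega
          · omega
          · omega
        have hjpos : 0 < pvFindCut mc
            (((messages.drop 2).take (messages.length - 6)).map pvContentLen) lens.sum 0 := by
          cases hcase : ((messages.drop 2).take (messages.length - 6)).map pvContentLen with
          | nil =>
            have := congrArg List.length hcase
            simp at this
            omega
          | cons l ls =>
            exact pvFindCut_pos mc l ls lens.sum (by omega)
        rw [if_neg (fun h : _ ∨ _ => h.elim hT h6), hrest, hdrop, h2, h1,
          if_pos (by omega), zero_add]
        have hsl : List.drop (pvFindCut mc
              (((messages.drop 2).take (messages.length - 6)).map pvContentLen) lens.sum 0).toNat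
              (messages.drop 2)
            = PySem.List.slice messages (some (2 + pvFindCut mc
              (((messages.drop 2).take (messages.length - 6)).map pvContentLen) lens.sum 0)) none := by
          rw [PySem.List.slice_from _ (by omega), List.drop_drop]
          congr 1
          omega
        rw [hsl]
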